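-- pv_equiv track=rewrite | github.com/samurayy99/one-person-one-billion | views/dossier_view.py | extract_business_data
-- ===== SOURCE A (Python) =====
-- from typing import Dict, List
--
-- def extract_business_data(blueprint: Dict) -> Dict[str, Dict[str, str]]:
--     """
--     Extract and organize all business data from startup blueprint.
--     Only returns fields that have meaningful content (not 'Not specified').
--     """
--     canvas = blueprint.get('canvas', {})
--     data_table = blueprint.get('data_table', {})
--
--     # Financial & Market Data
--     financial_data = {}
--     if data_table.get('Total Accessable Market') and data_table.get('Total Accessable Market') != 'Not specified':
--         financial_data['Total Addressable Market'] = data_table['Total Accessable Market']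
--     if data_table.get('Target Market') and data_table.get('Target Market') != 'Not specified':
--         financial_data['Target Market'] = data_table['Target Market']
--     if data_table.get('Investment') and data_table.get('Investment') != 'Not specified':
--         financial_data['Investment Required'] = data_table['Investment']
--     if data_table.get('Pre-Market Value') and data_table.get('Pre-Market Value') != 'Not specified':
--         financial_data['Pre-Market Valuation'] = data_table['Pre-Market Value']
--
--     # Add industry and customer segments
--     if blueprint.get('industry_focus'):
--         financial_data['Industry Focus'] = blueprint['industry_focus']
--     if canvas.get('Customer Segments') and canvas.get('Customer Segments') != 'Not specified':
--         financial_data['Customer Segments'] = canvas['Customer Segments']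
--     if canvas.get('Key Metrics') and canvas.get('Key Metrics') != 'Not specified':
--         financial_data['Key Metrics'] = canvas['Key Metrics']
--
--     # Business Model Core
--     business_model = {}
--     if canvas.get('Problem') and canvas.get('Problem') != 'Not specified':
--         business_model['Problem'] = canvas['Problem']
--     if canvas.get('Unique Value Proposition') and canvas.get('Unique Value Proposition') != 'Not specified':
--         business_model['Value Proposition'] = canvas['Unique Value Proposition']
--     if canvas.get('Proposed Solution') and canvas.get('Proposed Solution') != 'Not specified':
--         business_model['Proposed Solution'] = canvas['Proposed Solution']
--     if canvas.get('Channels') and canvas.get('Channels') != 'Not specified':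
--         business_model['Channels'] = canvas['Channels']
--     if canvas.get('Revenue Stream') and canvas.get('Revenue Stream') != 'Not specified':
--         business_model['Revenue Stream'] = canvas['Revenue Stream']
--     if canvas.get('Cost Structure') and canvas.get('Cost Structure') != 'Not specified':
--         business_model['Cost Structure'] = canvas['Cost Structure']
--
--     # Strategy & Execution
--     strategy_execution = {}
--     if canvas.get('Unfair Advantage') and canvas.get('Unfair Advantage') != 'Not specified':
--         strategy_execution['Unfair Advantage'] = canvas['Unfair Advantage']
--
--     # Handle nested Risk Management structure
--     risks = canvas.get('Key Risks & Mitigation')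
--     if risks and risks != 'Not specified':
--         if isinstance(risks, dict):
--             # Format nested risks properly
--             risk_text = ""
--             for risk_category, mitigation in risks.items():
--                 risk_text += f"**{risk_category}:** {mitigation}\n\n"
--             strategy_execution['Risk Management'] = risk_text.strip()
--         else:
--             # Handle string format
--             strategy_execution['Risk Management'] = risks
--
--     return {
--         'financial': financial_data,
--         'business_model': business_model,
--         'strategy': strategy_execution
--     }
-- ===== SOURCE B (Python) =====
-- from typing import Dict, List
--
-- # source-key -> output field name, per source dict
-- DT_MAP = {
--     'Total Accessable Market': 'Total Addressable Market',
--     'Target Market': 'Target Market',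
--     'Investment': 'Investment Required',
--     'Pre-Market Value': 'Pre-Market Valuation',
-- }
-- CV_MAP = {
--     'Customer Segments': 'Customer Segments',
--     'Key Metrics': 'Key Metrics',
--     'Problem': 'Problem',
--     'Unique Value Proposition': 'Value Proposition',
--     'Proposed Solution': 'Proposed Solution',
--     'Channels': 'Channels',
--     'Revenue Stream': 'Revenue Stream',
--     'Cost Structure': 'Cost Structure',
--     'Unfair Advantage': 'Unfair Advantage',
-- }
-- FINANCIAL_1 = ('Total Addressable Market', 'Target Market',
--                'Investment Required', 'Pre-Market Valuation')
-- FINANCIAL_2 = ('Customer Segments', 'Key Metrics')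
-- BUSINESS = ('Problem', 'Value Proposition', 'Proposed Solution',
--             'Channels', 'Revenue Stream', 'Cost Structure')
-- STRATEGY = ('Unfair Advantage',)
--
--
-- def extract_business_data(blueprint: Dict) -> Dict[str, Dict[str, str]]:
--     """Inverted, data-driven extraction: scan the SOURCE dicts' items once
--     against key->field maps, collecting hits into `found`; then emit each
--     section in the fixed field order from `found`."""
--     canvas = blueprint.get('canvas', {})
--     data_table = blueprint.get('data_table', {})
--
--     found = {}
--     for src, mapping in ((data_table, DT_MAP), (canvas, CV_MAP)):
--         for key, value in src.items():
--             out = mapping.get(key)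
--             if out and value and value != 'Not specified':
--                 found[out] = value
--
--     def emit(names):
--         return {name: found[name] for name in names if name in found}
--
--     financial_data = emit(FINANCIAL_1)
--     # industry_focus: truthiness-only check, no 'Not specified' exclusion
--     if blueprint.get('industry_focus'):
--         financial_data['Industry Focus'] = blueprint['industry_focus']
--     financial_data.update(emit(FINANCIAL_2))
--
--     business_model = emit(BUSINESS)
--
--     strategy_execution = emit(STRATEGY)
--     risks = canvas.get('Key Risks & Mitigation')
--     if risks and risks != 'Not specified':
--         if isinstance(risks, dict):
--             risk_text = ""
--             for risk_category, mitigation in risks.items():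
--                 risk_text += f"**{risk_category}:** {mitigation}\n\n"
--             strategy_execution['Risk Management'] = risk_text.strip()
--         else:
--             strategy_execution['Risk Management'] = risks
--
--     return {
--         'financial': financial_data,
--         'business_model': business_model,
--         'strategy': strategy_execution,
--     }
-- ===== Notes on version B (the rewrite author's own statement) =====
-- stated objective: alternative
-- what changed: Inverts the traversal: instead of A's fourteen field-by-field guarded lookups, B scans the source dicts' items once against key->field maps collecting hits into a 'found' dict, then emits each section in the fixed field order from 'found' (industry_focus's truthiness-only check and the nested-risk formatter stay as their own blocks).
import Mathlib
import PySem

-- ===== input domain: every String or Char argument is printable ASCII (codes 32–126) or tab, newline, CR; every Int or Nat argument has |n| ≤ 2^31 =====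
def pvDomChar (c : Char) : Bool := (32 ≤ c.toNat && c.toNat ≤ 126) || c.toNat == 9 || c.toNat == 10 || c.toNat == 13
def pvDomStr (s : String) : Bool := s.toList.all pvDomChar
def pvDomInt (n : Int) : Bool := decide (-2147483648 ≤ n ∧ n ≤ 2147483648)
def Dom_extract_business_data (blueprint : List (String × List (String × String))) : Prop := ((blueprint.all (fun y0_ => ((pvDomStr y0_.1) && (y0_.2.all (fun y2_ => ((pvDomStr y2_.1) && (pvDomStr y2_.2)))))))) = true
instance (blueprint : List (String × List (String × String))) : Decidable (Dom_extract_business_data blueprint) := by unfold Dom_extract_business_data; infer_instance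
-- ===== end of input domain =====

-- B inverts A's field-by-field guarded extraction: it scans the SOURCE dicts' items once
-- against key->field maps into a 'found' dict, then emits each section in the fixed field
-- order (objective: alternative). Equality of RETURN values only.


-- ===== PORT A =====
-- Under the type convention canvas/data_table values are String, so Python's
-- truthiness test on a value is v ≠ "" and isinstance(risks, dict) is always False
-- (only the string branch of the risk block is reachable); the industry_focus value
-- is itself a dict in this typing, not representable as a String — Pre_ excludes the
-- inputs on which that branch fires, and the port inserts "" there (unreachable under Pre_).
def extract_business_data (blueprint : List (String × List (String × String))) : List (String × List (String × String)) :=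
  let canvas := (PySem.Dict.mk blueprint).getD "canvas" []
  let data_table := (PySem.Dict.mk blueprint).getD "data_table" []
  let dt := PySem.Dict.mk data_table
  let cv := PySem.Dict.mk canvas
  let financial_data : PySem.Dict String String := PySem.Dict.empty
  let financial_data := if dt.getD "Total Accessable Market" "" ≠ "" ∧ dt.getD "Total Accessable Market" "" ≠ "Not specified" then financial_data.insert "Total Addressable Market" (dt.getD "Total Accessable Market" "") else financial_data
  let financial_data := if dt.getD "Target Market" "" ≠ "" ∧ dt.getD "Target Market" "" ≠ "Not specified" then financial_data.insert "Target Market" (dt.getD "Target Market" "") else financial_data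
  let financial_data := if dt.getD "Investment" "" ≠ "" ∧ dt.getD "Investment" "" ≠ "Not specified" then financial_data.insert "Investment Required" (dt.getD "Investment" "") else financial_data
  let financial_data := if dt.getD "Pre-Market Value" "" ≠ "" ∧ dt.getD "Pre-Market Value" "" ≠ "Not specified" then financial_data.insert "Pre-Market Valuation" (dt.getD "Pre-Market Value" "") else financial_data
  let financial_data := if (PySem.Dict.mk blueprint).getD "industry_focus" [] ≠ [] then financial_data.insert "Industry Focus" "" else financial_data
  let financial_data := if cv.getD "Customer Segments" "" ≠ "" ∧ cv.getD "Customer Segments" "" ≠ "Not specified" then financial_data.insert "Customer Segments" (cv.getD "Customer Segments" "") else financial_data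
  let financial_data := if cv.getD "Key Metrics" "" ≠ "" ∧ cv.getD "Key Metrics" "" ≠ "Not specified" then financial_data.insert "Key Metrics" (cv.getD "Key Metrics" "") else financial_data
  let business_model : PySem.Dict String String := PySem.Dict.empty
  let business_model := if cv.getD "Problem" "" ≠ "" ∧ cv.getD "Problem" "" ≠ "Not specified" then business_model.insert "Problem" (cv.getD "Problem" "") else business_model
  let business_model := if cv.getD "Unique Value Proposition" "" ≠ "" ∧ cv.getD "Unique Value Proposition" "" ≠ "Not specified" then business_model.insert "Value Proposition" (cv.getD "Unique Value Proposition" "") else business_model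
  let business_model := if cv.getD "Proposed Solution" "" ≠ "" ∧ cv.getD "Proposed Solution" "" ≠ "Not specified" then business_model.insert "Proposed Solution" (cv.getD "Proposed Solution" "") else business_model
  let business_model := if cv.getD "Channels" "" ≠ "" ∧ cv.getD "Channels" "" ≠ "Not specified" then business_model.insert "Channels" (cv.getD "Channels" "") else business_model
  let business_model := if cv.getD "Revenue Stream" "" ≠ "" ∧ cv.getD "Revenue Stream" "" ≠ "Not specified" then business_model.insert "Revenue Stream" (cv.getD "Revenue Stream" "") else business_model
  let business_model := if cv.getD "Cost Structure" "" ≠ "" ∧ cv.getD "Cost Structure" "" ≠ "Not specified" then business_model.insert "Cost Structure" (cv.getD "Cost Structure" "") else business_model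
  let strategy_execution : PySem.Dict String String := PySem.Dict.empty
  let strategy_execution := if cv.getD "Unfair Advantage" "" ≠ "" ∧ cv.getD "Unfair Advantage" "" ≠ "Not specified" then strategy_execution.insert "Unfair Advantage" (cv.getD "Unfair Advantage" "") else strategy_execution
  let risks := cv.getD "Key Risks & Mitigation" ""
  let strategy_execution := if risks ≠ "" ∧ risks ≠ "Not specified" then strategy_execution.insert "Risk Management" risks else strategy_execution
  [("financial", financial_data.items), ("business_model", business_model.items), ("strategy", strategy_execution.items)]

-- ===== PORT B =====
-- DT_MAP / CV_MAP: source-key -> output field name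
def pvDtMap : PySem.Dict String String := PySem.Dict.mk
  [("Total Accessable Market", "Total Addressable Market"),
   ("Target Market", "Target Market"),
   ("Investment", "Investment Required"),
   ("Pre-Market Value", "Pre-Market Valuation")]
def pvCvMap : PySem.Dict String String := PySem.Dict.mk
  [("Customer Segments", "Customer Segments"),
   ("Key Metrics", "Key Metrics"),
   ("Problem", "Problem"),
   ("Unique Value Proposition", "Value Proposition"),
   ("Proposed Solution", "Proposed Solution"),
   ("Channels", "Channels"),
   ("Revenue Stream", "Revenue Stream"),
   ("Cost Structure", "Cost Structure"),
   ("Unfair Advantage", "Unfair Advantage")]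

-- inner loop: for key, value in src.items(): out = mapping.get(key); if out and value and value != 'Not specified': found[out] = value
def pvScanL (m : PySem.Dict String String) (l : List (String × String)) (found : PySem.Dict String String) : PySem.Dict String String :=
  l.foldl (fun acc kv =>
    match m.get? kv.1 with
    | some out => if out ≠ "" ∧ kv.2 ≠ "" ∧ kv.2 ≠ "Not specified" then acc.insert out kv.2 else acc
    | none => acc) found

-- emit(names) = {name: found[name] for name in names if name in found}
def pvEmit (found : PySem.Dict String String) (names : List String) : PySem.Dict String String :=
  names.foldl (fun acc name =>
    match found.get? name with
    | some v => acc.insert name v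
    | none => acc) PySem.Dict.empty

-- financial_data.update(...)
def pvDictUpdate (d d2 : PySem.Dict String String) : PySem.Dict String String :=
  d2.items.foldl (fun acc kv => acc.insert kv.1 kv.2) d

def extract_business_data_alt (blueprint : List (String × List (String × String))) : List (String × List (String × String)) :=
  let canvas := (PySem.Dict.mk blueprint).getD "canvas" []
  let data_table := (PySem.Dict.mk blueprint).getD "data_table" []
  let cv := PySem.Dict.mk canvas
  let dt := PySem.Dict.mk data_table
  let found := pvScanL pvCvMap cv.items (pvScanL pvDtMap dt.items PySem.Dict.empty)
  let financial_data := pvEmit found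
    ["Total Addressable Market", "Target Market", "Investment Required", "Pre-Market Valuation"]
  -- industry_focus: truthiness-only; its value is a dict in this typing (see Pre_), "" inserted, unreachable under Pre_
  let financial_data := if (PySem.Dict.mk blueprint).getD "industry_focus" [] ≠ [] then financial_data.insert "Industry Focus" "" else financial_data
  let financial_data := pvDictUpdate financial_data (pvEmit found ["Customer Segments", "Key Metrics"])
  let business_model := pvEmit found
    ["Problem", "Value Proposition", "Proposed Solution", "Channels", "Revenue Stream", "Cost Structure"]
  let strategy_execution := pvEmit found ["Unfair Advantage"]
  let risks := cv.getD "Key Risks & Mitigation" ""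
  -- isinstance(risks, dict) is always False under the type convention: string branch only
  let strategy_execution := if risks ≠ "" ∧ risks ≠ "Not specified" then strategy_execution.insert "Risk Management" risks else strategy_execution
  [("financial", financial_data.items), ("business_model", business_model.items), ("strategy", strategy_execution.items)]

-- ===== PRECONDITION & SPEC =====
-- Pre_ excludes (i) blueprints whose 'industry_focus' entry is a non-empty dict: there Python A
-- returns a 'financial' dict whose 'Industry Focus' value is itself a dict, not a value of the
-- declared str-to-str type; and (ii) 'canvas'/'data_table' association lists with duplicate keys,
-- which do not encode any Python dict (first-vs-last match is an artefact of the encoding).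
def Pre_extract_business_data (blueprint : List (String × List (String × String))) : Prop :=
  (PySem.Dict.mk blueprint).getD "industry_focus" [] = [] ∧
  (((PySem.Dict.mk blueprint).getD "canvas" []).map Prod.fst).Nodup ∧
  (((PySem.Dict.mk blueprint).getD "data_table" []).map Prod.fst).Nodup
instance (blueprint : List (String × List (String × String))) : Decidable (Pre_extract_business_data blueprint) := by unfold Pre_extract_business_data; infer_instance
def pvWitness_extract_business_data : (List (String × List (String × String))) :=
  [("canvas", [("Problem", "pain"), ("Key Risks & Mitigation", "churn")]),
   ("data_table", [("Investment", "1m"), ("Target Market", "Not specified")])]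

def Spec_extract_business_data (blueprint : List (String × List (String × String))) (out : List (String × List (String × String))) : Prop := out = extract_business_data_alt blueprint
instance (blueprint : List (String × List (String × String))) (out : List (String × List (String × String))) : Decidable (Spec_extract_business_data blueprint out) := by unfold Spec_extract_business_data; infer_instance

-- ===== CLAIM (what is proved, stated in full; the proofs are below) =====
def Claim_equal_extract_business_data : Prop := ∀ (blueprint : List (String × List (String × String))), Dom_extract_business_data blueprint → Pre_extract_business_data blueprint → Spec_extract_business_data blueprint (extract_business_data blueprint)

-- ===== LEMMAS AND PROOFS =====

-- a raw association-list dict lookup that hits yields a pair of the list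
theorem pv_get?_mk_mem {l : List (String × String)} {k v : String}
    (h : (PySem.Dict.mk l).get? k = some v) : (k, v) ∈ l := by
  induction l with
  | nil => simp [PySem.Dict.get?] at h
  | cons p tl ih =>
    rw [show PySem.Dict.mk (p :: tl) = PySem.Dict.mk ((p.1, p.2) :: tl) from rfl,
        PySem.Dict.get?_mk_cons] at h
    by_cases hk : p.1 = k
    · simp [hk] at h; simp [← h, ← hk]
    · simp [hk] at h
      exact List.mem_cons_of_mem _ (ih h)

-- a scan none of whose keys maps to `out` leaves `found.get? out` unchanged
theorem pvScanL_get?_skip (m : PySem.Dict String String) (l : List (String × String))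
    (found : PySem.Dict String String) (out : String)
    (h : ∀ q ∈ l, m.get? q.1 ≠ some out) :
    (pvScanL m l found).get? out = found.get? out := by
  induction l generalizing found with
  | nil => rfl
  | cons p tl ih =>
    show (pvScanL m tl _).get? out = _
    rcases hm : m.get? p.1 with _ | o
    · simp only [hm]
      exact ih found (fun q hq => h q (List.mem_cons_of_mem _ hq))
    · have ho : out ≠ o := fun he => h p List.mem_cons_self (by rw [hm, he])
      simp only [hm]
      by_cases hc : o ≠ "" ∧ p.2 ≠ "" ∧ p.2 ≠ "Not specified"
      · rw [if_pos hc, ih _ (fun q hq => h q (List.mem_cons_of_mem _ hq)),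
            PySem.Dict.get?_insert_of_ne _ _ ho]
      · rw [if_neg hc, ih _ (fun q hq => h q (List.mem_cons_of_mem _ hq))]

-- the scan's effect on `out` when exactly the key `srckey` maps to it
theorem pvScanL_get?_unique (m : PySem.Dict String String) (l : List (String × String))
    (found : PySem.Dict String String) (out srckey : String)
    (h1 : m.get? srckey = some out)
    (h2 : ∀ k, m.get? k = some out → k = srckey)
    (hnd : (l.map Prod.fst).Nodup) :
    (pvScanL m l found).get? out =
      match (PySem.Dict.mk l).get? srckey with
      | some v => if out ≠ "" ∧ v ≠ "" ∧ v ≠ "Not specified" then some v else found.get? out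
      | none => found.get? out := by
  induction l generalizing found with
  | nil => rfl
  | cons p tl ih =>
    simp only [List.map_cons, List.nodup_cons] at hnd
    rw [show PySem.Dict.mk (p :: tl) = PySem.Dict.mk ((p.1, p.2) :: tl) from rfl,
        PySem.Dict.get?_mk_cons]
    by_cases hk : p.1 = srckey
    · have hbeq : (p.1 == srckey) = true := beq_iff_eq.mpr hk
      have hskip : ∀ q ∈ tl, m.get? q.1 ≠ some out := by
        intro q hq he
        apply hnd.1
        rw [show p.1 = q.1 from hk.trans (h2 q.1 he).symm]
        exact List.mem_map_of_mem hq
      show (pvScanL m tl _).get? out = _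
      rw [pvScanL_get?_skip m tl _ out hskip]
      simp only [show m.get? p.1 = some out from by rw [hk]; exact h1, hbeq, if_true]
      split_ifs
      · apply PySem.Dict.get?_insert_self
      · rfl
    · have hbeq : (p.1 == srckey) = false := beq_eq_false_iff_ne.mpr hk
      show (pvScanL m tl _).get? out = _
      rcases hm : m.get? p.1 with _ | o
      · simp only [hm, hbeq, Bool.false_eq_true, if_false]
        exact ih found hnd.2
      · have ho : out ≠ o := fun he => hk (h2 p.1 (by rw [hm, he]))
        simp only [hm, hbeq, Bool.false_eq_true, if_false]
        by_cases hc : o ≠ "" ∧ p.2 ≠ "" ∧ p.2 ≠ "Not specified"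
        · rw [if_pos hc, ih _ hnd.2, PySem.Dict.get?_insert_of_ne _ _ ho]
        · rw [if_neg hc, ih _ hnd.2]

-- one emit step under a characterisation of found.get?: equals A's guarded insert
theorem pv_emit_step (found src : PySem.Dict String String) (n key : String)
    (h : found.get? n =
      match src.get? key with
      | some v => if n ≠ "" ∧ v ≠ "" ∧ v ≠ "Not specified" then some v else none
      | none => none)
    (hn : n ≠ "") (acc : PySem.Dict String String) :
    (match found.get? n with
     | some v => acc.insert n v
     | none => acc) =
    if src.getD key "" ≠ "" ∧ src.getD key "" ≠ "Not specified" then acc.insert n (src.getD key "") else acc := by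
  rw [h, PySem.Dict.getD_eq_get?_getD]
  rcases src.get? key with _ | v
  · simp
  · simp only [Option.getD_some]
    by_cases hv : v ≠ "" ∧ v ≠ "Not specified"
    · rw [if_pos (show n ≠ "" ∧ v ≠ "" ∧ v ≠ "Not specified" from ⟨hn, hv⟩), if_pos hv]
    · rw [if_neg (fun hc => hv ⟨hc.2.1, hc.2.2⟩), if_neg hv]

-- B's 'financial_data.update(emit([CS, KM]))' replayed as two guarded inserts on d
theorem pv_update_emit2 (found d : PySem.Dict String String) :
    pvDictUpdate d (pvEmit found ["Customer Segments", "Key Metrics"]) =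
      (match found.get? "Key Metrics" with
       | some v2 =>
         (match found.get? "Customer Segments" with
          | some v1 => d.insert "Customer Segments" v1
          | none => d).insert "Key Metrics" v2
       | none =>
         match found.get? "Customer Segments" with
         | some v1 => d.insert "Customer Segments" v1
         | none => d) := by
  unfold pvDictUpdate pvEmit
  simp only [List.foldl]
  rcases found.get? "Customer Segments" with _ | v1 <;>
    rcases found.get? "Key Metrics" with _ | v2 <;>
      rfl

-- found.get? for a field sourced from data_table
theorem pv_found_dt (cl dl : List (String × String)) (hnd : (dl.map Prod.fst).Nodup)
    (out srckey : String)
    (h1 : pvDtMap.get? srckey = some out)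
    (h2 : ∀ k, pvDtMap.get? k = some out → k = srckey)
    (h3 : ∀ k, pvCvMap.get? k ≠ some out) :
    (pvScanL pvCvMap (PySem.Dict.mk cl).items (pvScanL pvDtMap (PySem.Dict.mk dl).items PySem.Dict.empty)).get? out =
      match (PySem.Dict.mk dl).get? srckey with
      | some v => if out ≠ "" ∧ v ≠ "" ∧ v ≠ "Not specified" then some v else none
      | none => none := by
  rw [pvScanL_get?_skip _ _ _ _ (fun q _ => h3 q.1),
      pvScanL_get?_unique _ _ _ _ _ h1 h2 hnd]
  rcases (PySem.Dict.mk dl).get? srckey <;> rfl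

-- found.get? for a field sourced from canvas
theorem pv_found_cv (cl dl : List (String × String)) (hnd : (cl.map Prod.fst).Nodup)
    (out srckey : String)
    (h1 : pvCvMap.get? srckey = some out)
    (h2 : ∀ k, pvCvMap.get? k = some out → k = srckey)
    (h3 : ∀ k, pvDtMap.get? k ≠ some out) :
    (pvScanL pvCvMap (PySem.Dict.mk cl).items (pvScanL pvDtMap (PySem.Dict.mk dl).items PySem.Dict.empty)).get? out =
      match (PySem.Dict.mk cl).get? srckey with
      | some v => if out ≠ "" ∧ v ≠ "" ∧ v ≠ "Not specified" then some v else none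
      | none => none := by
  rw [pvScanL_get?_unique _ _ _ _ _ h1 h2 hnd,
      pvScanL_get?_skip _ _ _ _ (fun q _ => h3 q.1)]
  rcases (PySem.Dict.mk cl).get? srckey <;> rfl

-- ===== VERDICT (by name: the statement is the Claim_ definition above) =====
theorem extract_business_data_spec : Claim_equal_extract_business_data := by
  intro bp _ hpre
  obtain ⟨hind, hndc, hndd⟩ := hpre
  unfold Spec_extract_business_data extract_business_data extract_business_data_alt
  simp only [hind, ne_eq, not_true_eq_false, if_false]
  have hTAM := pv_found_dt ((PySem.Dict.mk bp).getD "canvas" []) ((PySem.Dict.mk bp).getD "data_table" []) hndd "Total Addressable Market" "Total Accessable Market" rfl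
    (by intro k h; have := pv_get?_mk_mem (by simpa [pvDtMap] using h); simp at this; exact this)
    (by intro k h; have := pv_get?_mk_mem (by simpa [pvCvMap] using h); simp at this)
  have hTM := pv_found_dt ((PySem.Dict.mk bp).getD "canvas" []) ((PySem.Dict.mk bp).getD "data_table" []) hndd "Target Market" "Target Market" rfl
    (by intro k h; have := pv_get?_mk_mem (by simpa [pvDtMap] using h); simp at this; exact this)
    (by intro k h; have := pv_get?_mk_mem (by simpa [pvCvMap] using h); simp at this)
  have hINV := pv_found_dt ((PySem.Dict.mk bp).getD "canvas" []) ((PySem.Dict.mk bp).getD "data_table" []) hndd "Investment Required" "Investment" rfl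
    (by intro k h; have := pv_get?_mk_mem (by simpa [pvDtMap] using h); simp at this; exact this)
    (by intro k h; have := pv_get?_mk_mem (by simpa [pvCvMap] using h); simp at this)
  have hPMV := pv_found_dt ((PySem.Dict.mk bp).getD "canvas" []) ((PySem.Dict.mk bp).getD "data_table" []) hndd "Pre-Market Valuation" "Pre-Market Value" rfl
    (by intro k h; have := pv_get?_mk_mem (by simpa [pvDtMap] using h); simp at this; exact this)
    (by intro k h; have := pv_get?_mk_mem (by simpa [pvCvMap] using h); simp at this)
  have hCS := pv_found_cv ((PySem.Dict.mk bp).getD "canvas" []) ((PySem.Dict.mk bp).getD "data_table" []) hndc "Customer Segments" "Customer Segments" rfl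
    (by intro k h; have := pv_get?_mk_mem (by simpa [pvCvMap] using h); simp at this; exact this)
    (by intro k h; have := pv_get?_mk_mem (by simpa [pvDtMap] using h); simp at this)
  have hKM := pv_found_cv ((PySem.Dict.mk bp).getD "canvas" []) ((PySem.Dict.mk bp).getD "data_table" []) hndc "Key Metrics" "Key Metrics" rfl
    (by intro k h; have := pv_get?_mk_mem (by simpa [pvCvMap] using h); simp at this; exact this)
    (by intro k h; have := pv_get?_mk_mem (by simpa [pvDtMap] using h); simp at this)
  have hPB := pv_found_cv ((PySem.Dict.mk bp).getD "canvas" []) ((PySem.Dict.mk bp).getD "data_table" []) hndc "Problem" "Problem" rfl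
    (by intro k h; have := pv_get?_mk_mem (by simpa [pvCvMap] using h); simp at this; exact this)
    (by intro k h; have := pv_get?_mk_mem (by simpa [pvDtMap] using h); simp at this)
  have hVP := pv_found_cv ((PySem.Dict.mk bp).getD "canvas" []) ((PySem.Dict.mk bp).getD "data_table" []) hndc "Value Proposition" "Unique Value Proposition" rfl
    (by intro k h; have := pv_get?_mk_mem (by simpa [pvCvMap] using h); simp at this; exact this)
    (by intro k h; have := pv_get?_mk_mem (by simpa [pvDtMap] using h); simp at this)
  have hPS := pv_found_cv ((PySem.Dict.mk bp).getD "canvas" []) ((PySem.Dict.mk bp).getD "data_table" []) hndc "Proposed Solution" "Proposed Solution" rfl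
    (by intro k h; have := pv_get?_mk_mem (by simpa [pvCvMap] using h); simp at this; exact this)
    (by intro k h; have := pv_get?_mk_mem (by simpa [pvDtMap] using h); simp at this)
  have hCH := pv_found_cv ((PySem.Dict.mk bp).getD "canvas" []) ((PySem.Dict.mk bp).getD "data_table" []) hndc "Channels" "Channels" rfl
    (by intro k h; have := pv_get?_mk_mem (by simpa [pvCvMap] using h); simp at this; exact this)
    (by intro k h; have := pv_get?_mk_mem (by simpa [pvDtMap] using h); simp at this)
  have hRS := pv_found_cv ((PySem.Dict.mk bp).getD "canvas" []) ((PySem.Dict.mk bp).getD "data_table" []) hndc "Revenue Stream" "Revenue Stream" rfl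
    (by intro k h; have := pv_get?_mk_mem (by simpa [pvCvMap] using h); simp at this; exact this)
    (by intro k h; have := pv_get?_mk_mem (by simpa [pvDtMap] using h); simp at this)
  have hCT := pv_found_cv ((PySem.Dict.mk bp).getD "canvas" []) ((PySem.Dict.mk bp).getD "data_table" []) hndc "Cost Structure" "Cost Structure" rfl
    (by intro k h; have := pv_get?_mk_mem (by simpa [pvCvMap] using h); simp at this; exact this)
    (by intro k h; have := pv_get?_mk_mem (by simpa [pvDtMap] using h); simp at this)
  have hUA := pv_found_cv ((PySem.Dict.mk bp).getD "canvas" []) ((PySem.Dict.mk bp).getD "data_table" []) hndc "Unfair Advantage" "Unfair Advantage" rfl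
    (by intro k h; have := pv_get?_mk_mem (by simpa [pvCvMap] using h); simp at this; exact this)
    (by intro k h; have := pv_get?_mk_mem (by simpa [pvDtMap] using h); simp at this)
  rw [pv_update_emit2]
  unfold pvEmit
  simp only [List.foldl,
    pv_emit_step _ _ _ _ hTAM (by decide), pv_emit_step _ _ _ _ hTM (by decide),
    pv_emit_step _ _ _ _ hINV (by decide), pv_emit_step _ _ _ _ hPMV (by decide),
    pv_emit_step _ _ _ _ hCS (by decide), pv_emit_step _ _ _ _ hKM (by decide),
    pv_emit_step _ _ _ _ hPB (by decide), pv_emit_step _ _ _ _ hVP (by decide),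
    pv_emit_step _ _ _ _ hPS (by decide), pv_emit_step _ _ _ _ hCH (by decide),
    pv_emit_step _ _ _ _ hRS (by decide), pv_emit_step _ _ _ _ hCT (by decide),
    pv_emit_step _ _ _ _ hUA (by decide)]
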